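-- pv_equiv track=rewrite | github.com/gauravbhoi-design/Truscholar_Jark | backend/orchestrator.py | _route_command
-- ===== SOURCE A (Python) =====
-- def _route_command(command: str) -> str:
--     """Auto-detect which agent should handle a command."""
--     cmd = command.lower()
--
--     if any(kw in cmd for kw in ["review", "pr", "pull request", "bug", "fix", "code quality", "refactor"]):
--         return "code_reviewer"
--     elif any(kw in cmd for kw in ["test", "build", "ci", "coverage", "lint", "pytest", "jest"]):
--         return "test_runner"
--     elif any(kw in cmd for kw in ["log", "error", "rca", "alert", "monitor log", "crash", "exception"]):
--         return "log_monitor"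
--     elif any(kw in cmd for kw in ["deploy", "cloud", "gcp", "kubernetes", "k8s", "infra", "cost", "uptime", "service"]):
--         return "cloud_monitor"
--     else:
--         return "code_reviewer"  # Default
-- ===== SOURCE B (Python) =====
-- # Overwrite pass from lowest to highest priority: a flat keyword->agent list is
-- # scanned lowest-priority-first and every hit overwrites the result, so the final
-- # value is the agent of the highest-priority matching category (default first).
-- _OVERRIDES = (
--     [(kw, "cloud_monitor") for kw in ["deploy", "cloud", "gcp", "kubernetes", "k8s", "infra", "cost", "uptime", "service"]]
--     + [(kw, "log_monitor") for kw in ["log", "error", "rca", "alert", "monitor log", "crash", "exception"]]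
--     + [(kw, "test_runner") for kw in ["test", "build", "ci", "coverage", "lint", "pytest", "jest"]]
--     + [(kw, "code_reviewer") for kw in ["review", "pr", "pull request", "bug", "fix", "code quality", "refactor"]]
-- )
--
-- def _route_command(command: str) -> str:
--     """Auto-detect which agent should handle a command."""
--     cmd = command.lower()
--     agent = "code_reviewer"  # default
--     for kw, a in _OVERRIDES:
--         if kw in cmd:
--             agent = a
--     return agent
-- ===== Notes on version B (the rewrite author's own statement) =====
-- stated objective: alternative
-- what changed: Replaced the short-circuiting if/elif chain over per-category keyword lists by a single overwrite pass over a flat keyword-to-agent list ordered lowest priority first, so the last (highest-priority) hit wins and no early return or category grouping is needed.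
import Mathlib
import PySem

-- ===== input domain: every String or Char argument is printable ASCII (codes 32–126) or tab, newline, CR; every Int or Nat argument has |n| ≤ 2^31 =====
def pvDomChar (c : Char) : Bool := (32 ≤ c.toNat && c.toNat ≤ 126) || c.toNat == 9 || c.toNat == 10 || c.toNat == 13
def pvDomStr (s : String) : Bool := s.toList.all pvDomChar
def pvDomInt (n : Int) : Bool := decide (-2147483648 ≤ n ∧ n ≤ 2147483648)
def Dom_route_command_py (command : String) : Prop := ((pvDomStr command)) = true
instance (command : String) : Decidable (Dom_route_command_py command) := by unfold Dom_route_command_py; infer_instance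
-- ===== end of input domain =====

-- B replaces A's short-circuiting if/elif chain by a single overwrite pass over a
-- flat keyword→agent list ordered lowest priority first (alternative, same cost).

-- ===== PORT A =====
def route_command_py (command : String) : String :=
  let cmd := PySem.Str.lower command
  if ["review", "pr", "pull request", "bug", "fix", "code quality", "refactor"].any
      (fun kw => PySem.Str.isIn kw cmd) then "code_reviewer"
  else if ["test", "build", "ci", "coverage", "lint", "pytest", "jest"].any
      (fun kw => PySem.Str.isIn kw cmd) then "test_runner"
  else if ["log", "error", "rca", "alert", "monitor log", "crash", "exception"].any
      (fun kw => PySem.Str.isIn kw cmd) then "log_monitor"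
  else if ["deploy", "cloud", "gcp", "kubernetes", "k8s", "infra", "cost", "uptime", "service"].any
      (fun kw => PySem.Str.isIn kw cmd) then "cloud_monitor"
  else "code_reviewer"

-- ===== PORT B =====
-- flat keyword→agent list, lowest-priority category first (mirrors Source B's _OVERRIDES)
def pvOverrides : List (String × String) :=
  (["deploy", "cloud", "gcp", "kubernetes", "k8s", "infra", "cost", "uptime", "service"].map
      (fun kw => (kw, "cloud_monitor")))
  ++ (["log", "error", "rca", "alert", "monitor log", "crash", "exception"].map
      (fun kw => (kw, "log_monitor")))
  ++ (["test", "build", "ci", "coverage", "lint", "pytest", "jest"].map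
      (fun kw => (kw, "test_runner")))
  ++ (["review", "pr", "pull request", "bug", "fix", "code quality", "refactor"].map
      (fun kw => (kw, "code_reviewer")))

def route_command_py_alt (command : String) : String :=
  let cmd := PySem.Str.lower command
  pvOverrides.foldl (fun agent p => if PySem.Str.isIn p.1 cmd then p.2 else agent) "code_reviewer"

-- ===== PRECONDITION & SPEC =====
def Spec_route_command_py (command : String) (out : String) : Prop := out = route_command_py_alt command
instance (command : String) (out : String) : Decidable (Spec_route_command_py command out) := by unfold Spec_route_command_py; infer_instance

-- ===== CLAIM (what is proved, stated in full; the proofs are below) =====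
def Claim_equal_route_command_py : Prop := ∀ (command : String), Dom_route_command_py command → Spec_route_command_py command (route_command_py command)

-- ===== LEMMAS AND PROOFS =====

-- overwrite pass over a constant-agent segment = "if any keyword matches then that agent else the accumulator"
theorem pvFoldConst (cmd : String) (kws : List String) (a init : String) :
    (kws.map (fun kw => (kw, a))).foldl
        (fun agent p => if PySem.Str.isIn p.1 cmd then p.2 else agent) init
      = if kws.any (fun kw => PySem.Str.isIn kw cmd) then a else init := by
  induction kws generalizing init with
  | nil => rfl
  | cons k t ih =>
      simp only [List.map, List.foldl]
      by_cases h : PySem.Str.isIn k cmd = true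
      · rw [if_pos h, ih, List.any_cons, h]
        simp
      · rw [if_neg h, ih, List.any_cons, Bool.not_eq_true] at *
        rw [h, Bool.false_or]

-- ===== VERDICT (by name: the statement is the Claim_ definition above) =====
theorem route_command_py_spec : Claim_equal_route_command_py := by
  intro command _
  unfold Spec_route_command_py route_command_py route_command_py_alt pvOverrides
  rw [List.foldl_append, List.foldl_append, List.foldl_append,
      pvFoldConst, pvFoldConst, pvFoldConst, pvFoldConst]
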